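-- pv_equiv track=rewrite | github.com/MechTechnology/SmartStitch | SmartStitchConsole.py | SmartAdjust
-- ===== SOURCE A (Python) =====
-- def SmartAdjust(combined_pixels, split_height, split_offset, senstivity):
--     AdjustSensitivity = int(255 * (1-(senstivity/100)))
--     adjust_in_progress = True
--     new_split_height = split_height
--     countdown = True
--     while (adjust_in_progress):
--         adjust_in_progress = False
--         split_row = split_offset + new_split_height
--         pixel_row = combined_pixels[split_row]
--         prev_pixel = pixel_row[0]
--         for x in range(1, len(pixel_row)):
--             current_pixel = pixel_row[x]
--             diff_pixel = current_pixel - prev_pixel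
--             if (diff_pixel > AdjustSensitivity):
--                 if (countdown):
--                     new_split_height -= 1
--                 else:
--                     new_split_height += 1
--                 adjust_in_progress = True
--                 break
--             current_pixel = prev_pixel
--         if (new_split_height < 0.5*split_height):
--             new_split_height = split_height
--             countdown = False
--             adjust_in_progress = True
--     return new_split_height
-- ===== SOURCE B (Python) =====
-- def SmartAdjust(combined_pixels, split_height, split_offset, senstivity):
--     thr = int(255 * (1 - senstivity / 100))
--
--     def good(h):
--         try:
--             row = combined_pixels[split_offset + h]
--             first = row[0]
--         except IndexError:
--             return False
--         return all(p - first <= thr for p in row[1:])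
--
--     lo = (split_height + 1) // 2
--     candidates = [h for h in range(lo, split_height + 1) if good(h)]
--     if candidates:
--         return candidates[-1]
--     return next(h for h in range(split_height, len(combined_pixels) - split_offset) if good(h))
-- ===== Notes on version B (the rewrite author's own statement) =====
-- stated objective: alternative
-- what changed: A's flag/direction-driven while-loop state machine (sequential probe, decrement, reset-and-flip) is replaced by a set computation: build the list of all 'good' heights over the whole candidate interval [ceil(sh/2), sh] with one comprehension and return its last (= largest) element, falling back to the first good height found upward from split_height via next() over a bounded range.
import Mathlib
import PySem

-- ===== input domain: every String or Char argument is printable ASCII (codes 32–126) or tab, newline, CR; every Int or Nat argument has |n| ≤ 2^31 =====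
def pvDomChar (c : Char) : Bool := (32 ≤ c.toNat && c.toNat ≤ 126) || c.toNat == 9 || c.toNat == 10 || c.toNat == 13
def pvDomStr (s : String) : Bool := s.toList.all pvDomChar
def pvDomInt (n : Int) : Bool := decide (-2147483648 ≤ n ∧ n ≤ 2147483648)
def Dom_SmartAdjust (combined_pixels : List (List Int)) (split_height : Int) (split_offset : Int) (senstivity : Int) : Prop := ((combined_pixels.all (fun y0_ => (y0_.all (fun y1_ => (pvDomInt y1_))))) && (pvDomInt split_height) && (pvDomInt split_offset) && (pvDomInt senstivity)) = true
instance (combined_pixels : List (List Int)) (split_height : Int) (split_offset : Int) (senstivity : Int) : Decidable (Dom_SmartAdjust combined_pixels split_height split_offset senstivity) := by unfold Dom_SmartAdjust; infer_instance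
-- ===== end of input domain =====

-- B replaces A's flag/direction-driven while-loop state machine by a set computation: one
-- comprehension collects every "good" height of the candidate interval [ceil(sh/2), sh] and B
-- returns its last (= largest) element, else the first good height upward from split_height
-- (found with next() over a bounded range).  Same return value on Pre_.

-- Shared helper: the threshold  int(255 * (1 - senstivity/100))  computed with Python's float
-- (IEEE-754 double) semantics.  rneQ rounds an exact rational to the nearest double
-- (ties to even); exact for the magnitudes reachable here (no overflow/subnormals for |s| ≤ 2^31).
def rneQ (q : Rat) : Rat :=
  if q = 0 then 0 else
  let a : Nat := q.num.natAbs
  let b : Nat := q.den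
  -- a/b ≥ 2^e ?
  let ge : Int → Bool := fun e =>
    if 0 ≤ e then decide (b * 2 ^ e.toNat ≤ a) else decide (b ≤ a * 2 ^ (-e).toNat)
  let e0 : Int := (Nat.log2 a : Int) - (Nat.log2 b : Int)
  -- the unique e with 2^e ≤ a/b < 2^(e+1)
  let e : Int := if ge (e0 + 1) then e0 + 1 else if ge e0 then e0 else e0 - 1
  let k : Int := 52 - e
  let A : Nat := if 0 ≤ k then a * 2 ^ k.toNat else a
  let B : Nat := if 0 ≤ k then b else b * 2 ^ (-k).toNat
  let m0 : Nat := A / B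
  let r : Nat := A % B
  let m : Nat :=
    if 2 * r < B then m0
    else if B < 2 * r then m0 + 1
    else if m0 % 2 = 0 then m0 else m0 + 1
  let mag : Rat :=
    if 0 ≤ e - 52 then ((m * 2 ^ (e - 52).toNat : Nat) : Rat)
    else (m : Rat) / ((2 ^ (52 - e).toNat : Nat) : Rat)
  if q < 0 then -mag else mag

-- int(q): truncation toward zero
def truncQ (q : Rat) : Int := if 0 ≤ q then q.floor else q.ceil

-- AdjustSensitivity = int(255 * (1 - (senstivity/100)))  with float semantics
def pyThr (s : Int) : Int := truncQ (rneQ (255 * rneQ (1 - rneQ ((s : Rat) / 100))))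

-- ===== PORT A =====
-- the inner 'for x in range(1, len(pixel_row)): if pixel_row[x] - prev_pixel > thr: break'
-- (prev_pixel is never reassigned in A — the write goes to current_pixel — so it stays row[0])
def aBad (row : List Int) (p0 thr : Int) : Bool :=
  (PySem.List.pyRange 1 (row.length : Int) 1).any
    (fun x => decide (PySem.List.pyGetD row x 0 - p0 > thr))

-- A's while loop.  'new_split_height < 0.5*split_height' is ported as 2*h' < sh: both sides of
-- Python's float comparison are exact dyadic doubles at these magnitudes, so it equals the
-- rational comparison.  fuel only makes the recursion total: Python diverges / raises where it
-- runs out or an index test fails, and Pre_ excludes those inputs.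
def aLoop (cp : List (List Int)) (sh so thr : Int) (countdown : Bool) (h : Int) : Nat → Int
  | 0 => 0
  | fuel + 1 =>
    match PySem.List.pyGet? cp (so + h) with
    | none => 0          -- IndexError in Python (outside Pre_)
    | some row =>
      match PySem.List.pyGet? row 0 with
      | none => 0        -- IndexError in Python (outside Pre_)
      | some p0 =>
        if aBad row p0 thr then
          let h' := if countdown then h - 1 else h + 1
          if 2 * h' < sh then aLoop cp sh so thr false sh fuel
          else aLoop cp sh so thr countdown h' fuel
        else
          if 2 * h < sh then aLoop cp sh so thr false sh fuel
          else h

def SmartAdjust (combined_pixels : List (List Int)) (split_height : Int) (split_offset : Int) (senstivity : Int) : Int :=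
  aLoop combined_pixels split_height split_offset (pyThr senstivity) true split_height
    (split_height.toNat + combined_pixels.length + split_offset.natAbs + 4)

-- ===== PORT B =====
-- good(h): row = cp[so+h]; first = row[0]; all(p - first <= thr for p in row[1:]);
-- the try/except IndexError returns False where either lookup would raise.
def bGood (cp : List (List Int)) (so thr h : Int) : Bool :=
  match PySem.List.pyGet? cp (so + h) with
  | none => false       -- IndexError caught: return False
  | some row =>
    match PySem.List.pyGet? row 0 with
    | none => false     -- IndexError caught: return False
    | some first => (PySem.List.slice row (some 1) none).all (fun p => decide (p - first ≤ thr))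

-- candidates = [h for h in range(lo, sh+1) if good(h)]; candidates[-1] if nonempty,
-- else next(h for h in range(sh, len(cp)-so) if good(h))  (StopIteration outside Pre_: getD 0)
def SmartAdjust_alt (combined_pixels : List (List Int)) (split_height : Int) (split_offset : Int) (senstivity : Int) : Int :=
  let thr := pyThr senstivity
  let lo := PySem.Int.floordiv (split_height + 1) 2
  let candidates := (PySem.List.pyRange lo (split_height + 1) 1).filter (bGood combined_pixels split_offset thr)
  match PySem.List.pyGet? candidates (-1) with
  | some h => h
  | none =>
    ((PySem.List.pyRange split_height ((combined_pixels.length : Int) - split_offset) 1).find?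
        (bGood combined_pixels split_offset thr)).getD 0

-- ===== PRECONDITION & SPEC =====
-- row is "good" (the scan would not move past it): every later pixel exceeds row[0] by ≤ thr
def rowGood (row : List Int) (thr : Int) : Bool :=
  match row with
  | [] => false
  | p0 :: rest => rest.all (fun p => decide (p - p0 ≤ thr))

-- row is "bad" (the scan moves past it): some later pixel exceeds row[0] by more than thr
def rowBad (row : List Int) (thr : Int) : Bool :=
  match row with
  | [] => false
  | p0 :: rest => rest.any (fun p => decide (p - p0 > thr))

-- Pre_ excludes exactly the inputs on which A raises IndexError or loops forever, except that it
-- also drops negative split_height (there A diverges whenever a good row would stop the scan,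
-- and returns only on lucky corner configurations).  It asks for a nonnegative split_height and a
-- trace shape guaranteeing termination: either the countdown from split_height walks over bad
-- rows to a good row at or above ceil(split_height/2), or that whole range is bad and the upward
-- scan from split_height walks over bad rows to a good row before the end of the list.
def Pre_SmartAdjust (combined_pixels : List (List Int)) (split_height : Int) (split_offset : Int) (senstivity : Int) : Prop :=
  0 ≤ split_height ∧
  ((-(combined_pixels.length : Int) ≤ split_offset + split_height ∧
    split_offset + split_height < (combined_pixels.length : Int) ∧
    ∃ j : Nat, j < (min (split_height - PySem.Int.floordiv (split_height + 1) 2 + 1)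
        (split_offset + split_height + (combined_pixels.length : Int) + 1)).toNat ∧
      rowGood (PySem.List.pyGetD combined_pixels (split_offset + split_height - (j : Int)) [])
        (pyThr senstivity) = true ∧
      ∀ j' : Nat, j' < j →
        rowBad (PySem.List.pyGetD combined_pixels (split_offset + split_height - (j' : Int)) [])
          (pyThr senstivity) = true) ∨
   (-(combined_pixels.length : Int) ≤ split_offset + PySem.Int.floordiv (split_height + 1) 2 ∧
    split_offset + split_height < (combined_pixels.length : Int) ∧
    (∀ j' : Nat, j' < (split_height - PySem.Int.floordiv (split_height + 1) 2 + 1).toNat →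
        rowBad (PySem.List.pyGetD combined_pixels (split_offset + split_height - (j' : Int)) [])
          (pyThr senstivity) = true) ∧
    ∃ k : Nat, k < ((combined_pixels.length : Int) - split_offset - split_height).toNat ∧
      rowGood (PySem.List.pyGetD combined_pixels (split_offset + split_height + (k : Int)) [])
        (pyThr senstivity) = true ∧
      ∀ k' : Nat, k' < k →
        rowBad (PySem.List.pyGetD combined_pixels (split_offset + split_height + (k' : Int)) [])
          (pyThr senstivity) = true))

instance (combined_pixels : List (List Int)) (split_height : Int) (split_offset : Int) (senstivity : Int) : Decidable (Pre_SmartAdjust combined_pixels split_height split_offset senstivity) := by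
  unfold Pre_SmartAdjust; infer_instance

def pvWitness_SmartAdjust : List (List Int) × Int × Int × Int := ([[0], [0]], 0, 0, 90)

def Spec_SmartAdjust (combined_pixels : List (List Int)) (split_height : Int) (split_offset : Int) (senstivity : Int) (out : Int) : Prop := out = SmartAdjust_alt combined_pixels split_height split_offset senstivity
instance (combined_pixels : List (List Int)) (split_height : Int) (split_offset : Int) (senstivity : Int) (out : Int) : Decidable (Spec_SmartAdjust combined_pixels split_height split_offset senstivity out) := by unfold Spec_SmartAdjust; infer_instance

-- ===== CLAIM (what is proved, stated in full; the proofs are below) =====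
def Claim_equal_SmartAdjust : Prop := ∀ (combined_pixels : List (List Int)) (split_height : Int) (split_offset : Int) (senstivity : Int), Dom_SmartAdjust combined_pixels split_height split_offset senstivity → Pre_SmartAdjust combined_pixels split_height split_offset senstivity → Spec_SmartAdjust combined_pixels split_height split_offset senstivity (SmartAdjust combined_pixels split_height split_offset senstivity)


-- ===== LEMMAS AND PROOFS =====

-- A's index-based inner scan over range(1, len(row)) equals an `any` over the dropped prefix.
theorem anyRange_drop (row : List Int) (g : Int → Bool) :
    ∀ (n j : Nat), row.length - j = n →
      (PySem.List.pyRange (j : Int) (row.length : Int)).any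
        (fun x => g (PySem.List.pyGetD row x 0)) = (row.drop j).any g := by
  intro n
  induction n with
  | zero =>
    intro j hj
    have hdrop : row.drop j = [] := List.drop_eq_nil_of_le (by omega)
    rw [hdrop]
    rw [List.any_eq_false.2]
    · rfl
    · intro x hx
      have := PySem.List.mem_pyRange_one.1 hx
      omega
  | succ n ih =>
    intro j hj
    have hlt : j < row.length := by omega
    rw [PySem.List.pyRange_one_cons (by exact_mod_cast hlt), List.any_cons]
    rw [List.drop_eq_getElem_cons hlt, List.any_cons]
    have h1 : PySem.List.pyGetD row (j : Int) 0 = row[j] := by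
      rw [PySem.List.pyGetD_eq_getElem row 0 (by omega) (by exact_mod_cast hlt)]
      simp
    have h2 : ((j : Int) + 1) = ((j + 1 : Nat) : Int) := by push_cast; ring
    rw [h1, h2, ih (j + 1) (by omega)]

theorem aBad_cons (p0 : Int) (rest : List Int) (thr : Int) :
    aBad (p0 :: rest) p0 thr = rest.any (fun p => decide (p - p0 > thr)) := by
  have := anyRange_drop (p0 :: rest) (fun p => decide (p - p0 > thr)) rest.length 1 (by simp)
  simpa [aBad] using this

-- a good or bad row fact about pyGetD forces the Python lookup to succeed with that row
theorem pyGet?_of_pyGetD_ne_nil (xs : List (List Int)) (i : Int)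
    (h : PySem.List.pyGetD xs i [] ≠ ([] : List Int)) :
    PySem.List.pyGet? xs i = some (PySem.List.pyGetD xs i []) := by
  have hd : PySem.List.pyGetD xs i [] = (PySem.List.pyGet? xs i).getD [] := rfl
  cases hx : PySem.List.pyGet? xs i with
  | none => rw [hd, hx] at h; exact absurd rfl h
  | some row => rw [hd, hx]; rfl

theorem rowGood_ne_nil (row : List Int) (thr : Int) (h : rowGood row thr = true) :
    row ≠ ([] : List Int) := by
  cases row with
  | nil => simp [rowGood] at h
  | cons a l => exact List.cons_ne_nil a l

theorem rowBad_ne_nil (row : List Int) (thr : Int) (h : rowBad row thr = true) :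
    row ≠ ([] : List Int) := by
  cases row with
  | nil => simp [rowBad] at h
  | cons a l => exact List.cons_ne_nil a l

-- bGood agrees with the row predicates wherever they certify a nonempty, in-range row
theorem bGood_of_rowGood (cp : List (List Int)) (so thr h : Int)
    (hg : rowGood (PySem.List.pyGetD cp (so + h) []) thr = true) :
    bGood cp so thr h = true := by
  have hrow := pyGet?_of_pyGetD_ne_nil cp (so + h) (rowGood_ne_nil _ thr hg)
  cases hc : PySem.List.pyGetD cp (so + h) [] with
  | nil => exact absurd hc (rowGood_ne_nil _ thr (by rwa [hc] at hg ⊢))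
  | cons p0 rest =>
    rw [hc] at hrow hg
    simp only [rowGood, List.all_eq_true] at hg
    simp only [bGood, hrow, PySem.List.pyGet?_zero_cons, PySem.List.slice_from_one,
      List.all_eq_true]
    exact hg

theorem bGood_of_rowBad (cp : List (List Int)) (so thr h : Int)
    (hb : rowBad (PySem.List.pyGetD cp (so + h) []) thr = true) :
    bGood cp so thr h = false := by
  have hrow := pyGet?_of_pyGetD_ne_nil cp (so + h) (rowBad_ne_nil _ thr hb)
  cases hc : PySem.List.pyGetD cp (so + h) [] with
  | nil => exact absurd hc (rowBad_ne_nil _ thr (by rwa [hc] at hb ⊢))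
  | cons p0 rest =>
    rw [hc] at hrow hb
    simp only [rowBad, List.any_eq_true] at hb
    obtain ⟨p, hp, hgt⟩ := hb
    simp only [bGood, hrow, PySem.List.pyGet?_zero_cons, PySem.List.slice_from_one]
    rw [List.all_eq_false]
    refine ⟨p, hp, ?_⟩
    simp at hgt ⊢
    omega

-- ===== A-side loop characterisations =====

-- countdown meets a good row j steps down, before falling below ceil(sh/2): A returns h - j
theorem aLoop_down_good (cp : List (List Int)) (sh so thr : Int) :
    ∀ (j : Nat) (h : Int) (fa : Nat),
      sh ≤ 2 * h → h ≤ sh →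
      (j : Int) ≤ h - PySem.Int.floordiv (sh + 1) 2 →
      rowGood (PySem.List.pyGetD cp (so + h - (j : Int)) []) thr = true →
      (∀ j' : Nat, j' < j →
        rowBad (PySem.List.pyGetD cp (so + h - (j' : Int)) []) thr = true) →
      j < fa →
      aLoop cp sh so thr true h fa = h - (j : Int) := by
  have hfd : ∀ hsh0 : 0 ≤ sh, PySem.Int.floordiv (sh + 1) 2 = (sh + 1) / 2 := fun _ =>
    PySem.Int.floordiv_eq_ediv_of_pos (by omega)
  intro j
  induction j with
  | zero =>
    intro h fa hh2 hhsh hjle hgood _ hfa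
    obtain ⟨fa, rfl⟩ : ∃ m, fa = m + 1 := ⟨fa - 1, by omega⟩
    rw [show so + h - ((0 : Nat) : Int) = so + h by push_cast; ring] at hgood
    have hrow := pyGet?_of_pyGetD_ne_nil cp (so + h) (rowGood_ne_nil _ thr hgood)
    obtain ⟨p0, rest, hpr⟩ : ∃ p0 rest, PySem.List.pyGetD cp (so + h) [] = p0 :: rest := by
      cases hc : PySem.List.pyGetD cp (so + h) [] with
      | nil => exact absurd hc (rowGood_ne_nil _ thr (by rwa [hc] at hgood ⊢))
      | cons p0 rest => exact ⟨p0, rest, rfl⟩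
    rw [hpr] at hrow hgood
    have hbf : rest.any (fun p => decide (p - p0 > thr)) = false := by
      simp only [rowGood, List.all_eq_true] at hgood
      rw [List.any_eq_false]
      intro p hp
      have := hgood p hp
      simp at this ⊢
      omega
    simp only [aLoop, hrow, PySem.List.pyGet?_zero_cons, aBad_cons, hbf]
    simp only [Bool.false_eq_true, if_false, if_neg (by omega : ¬ 2 * h < sh)]
    push_cast; ring
  | succ j ih =>
    intro h fa hh2 hhsh hjle hgood hbad hfa
    obtain ⟨fa, rfl⟩ : ∃ m, fa = m + 1 := ⟨fa - 1, by omega⟩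
    have hb0 : rowBad (PySem.List.pyGetD cp (so + h) []) thr = true := by
      have := hbad 0 (by omega)
      rwa [show so + h - ((0 : Nat) : Int) = so + h by push_cast; ring] at this
    have hrow := pyGet?_of_pyGetD_ne_nil cp (so + h) (rowBad_ne_nil _ thr hb0)
    obtain ⟨p0, rest, hpr⟩ : ∃ p0 rest, PySem.List.pyGetD cp (so + h) [] = p0 :: rest := by
      cases hc : PySem.List.pyGetD cp (so + h) [] with
      | nil => exact absurd hc (rowBad_ne_nil _ thr (by rwa [hc] at hb0 ⊢))
      | cons p0 rest => exact ⟨p0, rest, rfl⟩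
    rw [hpr] at hrow hb0
    have hb : rest.any (fun p => decide (p - p0 > thr)) = true := hb0
    simp only [aLoop, hrow, PySem.List.pyGet?_zero_cons, aBad_cons, hb]
    simp only [if_true]
    have hsh0 : 0 ≤ sh := by omega
    rw [hfd hsh0] at hjle
    rw [if_neg (by push_cast at hjle; omega : ¬ 2 * (h - 1) < sh)]
    have hc : ∀ (m : Nat), so + (h - 1) - (m : Int) = so + h - ((m + 1 : Nat) : Int) := by
      intro m; push_cast; ring
    have := ih (h - 1) fa (by push_cast at hjle; omega) (by omega)
      (by rw [hfd hsh0]; push_cast at hjle ⊢; omega)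
      (by rw [hc j]; exact hgood)
      (by intro j' hj'; rw [hc j']; exact hbad (j' + 1) (by omega))
      (by omega)
    rw [this]; push_cast; ring

-- upward phase: walking over bad rows to a good row k steps above h, A returns h + k
theorem aLoop_up (cp : List (List Int)) (sh so thr : Int) (hsh : 0 ≤ sh) :
    ∀ (k : Nat) (h : Int) (fa : Nat),
      sh ≤ h →
      rowGood (PySem.List.pyGetD cp (so + h + (k : Int)) []) thr = true →
      (∀ k' : Nat, k' < k →
        rowBad (PySem.List.pyGetD cp (so + h + (k' : Int)) []) thr = true) →
      k < fa →
      aLoop cp sh so thr false h fa = h + (k : Int) := by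
  intro k
  induction k with
  | zero =>
    intro h fa hh hgood _ hfa
    obtain ⟨fa, rfl⟩ : ∃ m, fa = m + 1 := ⟨fa - 1, by omega⟩
    rw [show so + h + ((0 : Nat) : Int) = so + h by push_cast; ring] at hgood
    have hrow := pyGet?_of_pyGetD_ne_nil cp (so + h) (rowGood_ne_nil _ thr hgood)
    obtain ⟨p0, rest, hpr⟩ : ∃ p0 rest, PySem.List.pyGetD cp (so + h) [] = p0 :: rest := by
      cases hc : PySem.List.pyGetD cp (so + h) [] with
      | nil => exact absurd hc (rowGood_ne_nil _ thr (by rwa [hc] at hgood ⊢))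
      | cons p0 rest => exact ⟨p0, rest, rfl⟩
    rw [hpr] at hrow hgood
    have hbf : rest.any (fun p => decide (p - p0 > thr)) = false := by
      simp only [rowGood, List.all_eq_true] at hgood
      rw [List.any_eq_false]
      intro p hp
      have := hgood p hp
      simp at this ⊢
      omega
    simp only [aLoop, hrow, PySem.List.pyGet?_zero_cons, aBad_cons, hbf]
    simp only [Bool.false_eq_true, if_false, if_neg (by omega : ¬ 2 * h < sh)]
    push_cast; ring
  | succ k ih =>
    intro h fa hh hgood hbad hfa
    obtain ⟨fa, rfl⟩ : ∃ m, fa = m + 1 := ⟨fa - 1, by omega⟩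
    have hb0 : rowBad (PySem.List.pyGetD cp (so + h) []) thr = true := by
      have := hbad 0 (by omega)
      rwa [show so + h + ((0 : Nat) : Int) = so + h by push_cast; ring] at this
    have hrow := pyGet?_of_pyGetD_ne_nil cp (so + h) (rowBad_ne_nil _ thr hb0)
    obtain ⟨p0, rest, hpr⟩ : ∃ p0 rest, PySem.List.pyGetD cp (so + h) [] = p0 :: rest := by
      cases hc : PySem.List.pyGetD cp (so + h) [] with
      | nil => exact absurd hc (rowBad_ne_nil _ thr (by rwa [hc] at hb0 ⊢))
      | cons p0 rest => exact ⟨p0, rest, rfl⟩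
    rw [hpr] at hrow hb0
    have hb : rest.any (fun p => decide (p - p0 > thr)) = true := hb0
    simp only [aLoop, hrow, PySem.List.pyGet?_zero_cons, aBad_cons, hb]
    simp only [if_true, Bool.false_eq_true, if_false]
    rw [if_neg (by omega : ¬ 2 * (h + 1) < sh)]
    have hc : ∀ (m : Nat), so + (h + 1) + (m : Int) = so + h + ((m + 1 : Nat) : Int) := by
      intro m; push_cast; ring
    have := ih (h + 1) fa (by omega)
      (by rw [hc k]; exact hgood)
      (by intro k' hk'; rw [hc k']; exact hbad (k' + 1) (by omega))
      (by omega)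
    rw [this]; push_cast; ring

-- falling-through case: every row of the countdown range is bad, so A resets, flips to
-- counting up, and returns sh + k (k = distance to the first good row above split_height)
theorem aLoop_down_bad (cp : List (List Int)) (sh so thr : Int) (hsh : 0 ≤ sh) (k : Nat)
    (hgood : rowGood (PySem.List.pyGetD cp (so + sh + (k : Int)) []) thr = true)
    (hbadUp : ∀ k' : Nat, k' < k →
      rowBad (PySem.List.pyGetD cp (so + sh + (k' : Int)) []) thr = true) :
    ∀ (fa : Nat) (h : Int),
      sh ≤ 2 * h → h ≤ sh →
      (∀ j' : Nat, (j' : Int) ≤ h - PySem.Int.floordiv (sh + 1) 2 →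
        rowBad (PySem.List.pyGetD cp (so + h - (j' : Int)) []) thr = true) →
      (h - PySem.Int.floordiv (sh + 1) 2).toNat + k + 2 ≤ fa →
      aLoop cp sh so thr true h fa = sh + (k : Int) := by
  have hfd : PySem.Int.floordiv (sh + 1) 2 = (sh + 1) / 2 :=
    PySem.Int.floordiv_eq_ediv_of_pos (by omega)
  intro fa
  induction fa with
  | zero => intro h _ _ _ hfa; omega
  | succ fa ih =>
    intro h hh2 hhsh hbadDown hfa
    rw [hfd] at hfa
    have hhmin : (sh + 1) / 2 ≤ h := by omega
    have hb0 : rowBad (PySem.List.pyGetD cp (so + h) []) thr = true := by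
      have := hbadDown 0 (by push_cast; rw [hfd]; omega)
      rwa [show so + h - ((0 : Nat) : Int) = so + h by push_cast; ring] at this
    have hrow := pyGet?_of_pyGetD_ne_nil cp (so + h) (rowBad_ne_nil _ thr hb0)
    obtain ⟨p0, rest, hpr⟩ : ∃ p0 rest, PySem.List.pyGetD cp (so + h) [] = p0 :: rest := by
      cases hc : PySem.List.pyGetD cp (so + h) [] with
      | nil => exact absurd hc (rowBad_ne_nil _ thr (by rwa [hc] at hb0 ⊢))
      | cons p0 rest => exact ⟨p0, rest, rfl⟩
    rw [hpr] at hrow hb0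
    have hb : rest.any (fun p => decide (p - p0 > thr)) = true := hb0
    simp only [aLoop, hrow, PySem.List.pyGet?_zero_cons, aBad_cons, hb]
    simp only [if_true]
    by_cases hreset : 2 * (h - 1) < sh
    · rw [if_pos hreset]
      exact aLoop_up cp sh so thr hsh k sh fa le_rfl hgood hbadUp (by omega)
    · rw [if_neg hreset]
      have hc : ∀ (m : Nat), so + (h - 1) - (m : Int) = so + h - ((m + 1 : Nat) : Int) := by
        intro m; push_cast; ring
      exact ih (h - 1) (by omega) (by omega)
        (by intro j' hj'
            rw [hfd] at hj'
            rw [hc j']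
            exact hbadDown (j' + 1) (by push_cast; rw [hfd]; omega))
        (by rw [hfd]; omega)

-- ===== B-side characterisations =====

-- the filtered candidate list ends in m when m is good and everything above it is not
theorem filter_range_last (p : Int → Bool) (lo m hi : Int)
    (hlom : lo ≤ m) (hmhi : m < hi)
    (hpm : p m = true)
    (habove : ∀ h : Int, m < h → h < hi → p h = false) :
    PySem.List.pyGet? ((PySem.List.pyRange lo hi 1).filter p) (-1) = some m := by
  rw [PySem.List.pyRange_one_append lo (m + 1) hi (by omega) (by omega),
    PySem.List.pyRange_one_succ_right hlom]
  rw [List.filter_append, List.filter_append]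
  have h1 : (PySem.List.pyRange (m + 1) hi 1).filter p = [] := by
    rw [List.filter_eq_nil_iff]
    intro x hx
    have := PySem.List.mem_pyRange_one.1 hx
    simp [habove x (by omega) (by omega)]
  rw [h1, List.append_nil, List.filter_cons_of_pos (by simpa using hpm), List.filter_nil]
  exact PySem.List.pyGet?_neg_one_append_singleton _ m

-- the filtered candidate list is empty when no height of the interval is good
theorem filter_range_nil (p : Int → Bool) (lo hi : Int)
    (hall : ∀ h : Int, lo ≤ h → h < hi → p h = false) :
    (PySem.List.pyRange lo hi 1).filter p = [] := by
  rw [List.filter_eq_nil_iff]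
  intro x hx
  have := PySem.List.mem_pyRange_one.1 hx
  simp [hall x (by omega) (by omega)]

-- next() over a range: the first index satisfying p
theorem find?_range_first (p : Int → Bool) :
    ∀ (k : Nat) (a b : Int),
      a + (k : Int) < b →
      p (a + (k : Int)) = true →
      (∀ k' : Nat, k' < k → p (a + (k' : Int)) = false) →
      (PySem.List.pyRange a b 1).find? p = some (a + (k : Int)) := by
  intro k
  induction k with
  | zero =>
    intro a b hlt hp _
    rw [show a + ((0 : Nat) : Int) = a by push_cast; ring] at hp ⊢
    rw [PySem.List.pyRange_one_cons (by omega), List.find?_cons_of_pos hp]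
  | succ k ih =>
    intro a b hlt hp hbefore
    have hp0 : p a = false := by
      have := hbefore 0 (by omega)
      rwa [show a + ((0 : Nat) : Int) = a by push_cast; ring] at this
    rw [PySem.List.pyRange_one_cons (by omega), List.find?_cons_of_neg (by simp [hp0])]
    have hc : ∀ (m : Nat), a + 1 + (m : Int) = a + ((m + 1 : Nat) : Int) := by
      intro m; push_cast; ring
    have := ih (a + 1) b (by rw [hc k]; omega) (by rw [hc k]; exact hp)
      (by intro k' hk'; rw [hc k']; exact hbefore (k' + 1) (by omega))
    rw [this, hc k]

-- ===== VERDICT (by name: the statement is the Claim_ definition above) =====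
theorem SmartAdjust_spec : Claim_equal_SmartAdjust := by
  intro cp sh so s _hdom hpre
  obtain ⟨hsh, hpre⟩ := hpre
  show SmartAdjust cp sh so s = SmartAdjust_alt cp sh so s
  unfold SmartAdjust SmartAdjust_alt
  have hfd : PySem.Int.floordiv (sh + 1) 2 = (sh + 1) / 2 :=
    PySem.Int.floordiv_eq_ediv_of_pos (by omega)
  cases hpre with
  | inl hdown =>
    obtain ⟨-, -, j, hjb, hgood, hbads⟩ := hdown
    rw [hfd] at hjb
    have hA : aLoop cp sh so (pyThr s) true sh
        (sh.toNat + cp.length + so.natAbs + 4) = sh - (j : Int) :=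
      aLoop_down_good cp sh so (pyThr s) j sh _ (by omega) le_rfl
        (by rw [hfd]; omega) hgood hbads (by omega)
    have hlast : PySem.List.pyGet?
        ((PySem.List.pyRange (PySem.Int.floordiv (sh + 1) 2) (sh + 1) 1).filter
          (bGood cp so (pyThr s))) (-1) = some (sh - (j : Int)) := by
      apply filter_range_last
      · rw [hfd]; omega
      · omega
      · exact bGood_of_rowGood cp so (pyThr s) (sh - (j : Int))
          (by rw [show so + (sh - (j : Int)) = so + sh - (j : Int) by ring]; exact hgood)
      · intro h hmh hhsh
        have hj' : ((sh - h).toNat : Int) = sh - h := by omega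
        apply bGood_of_rowBad
        rw [show so + h = so + sh - (((sh - h).toNat : Nat) : Int) by rw [hj']; ring]
        exact hbads (sh - h).toNat (by omega)
    simp only [hA, hlast]
  | inr hup =>
    obtain ⟨-, -, hbadDown, k, hkb, hgood, hbads⟩ := hup
    have hA : aLoop cp sh so (pyThr s) true sh
        (sh.toNat + cp.length + so.natAbs + 4) = sh + (k : Int) :=
      aLoop_down_bad cp sh so (pyThr s) hsh k hgood hbads _ sh (by omega) le_rfl
        (by intro j' hj'
            rw [hfd] at hj'
            exact hbadDown j' (by rw [hfd]; omega))
        (by rw [hfd]; omega)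
    have hnil : (PySem.List.pyRange (PySem.Int.floordiv (sh + 1) 2) (sh + 1) 1).filter
        (bGood cp so (pyThr s)) = [] := by
      apply filter_range_nil
      intro h hlo hhi
      rw [hfd] at hlo
      have hj' : ((sh - h).toNat : Int) = sh - h := by omega
      apply bGood_of_rowBad
      rw [show so + h = so + sh - (((sh - h).toNat : Nat) : Int) by rw [hj']; ring]
      exact hbadDown (sh - h).toNat (by rw [hfd]; omega)
    have hfind : (PySem.List.pyRange sh ((cp.length : Int) - so) 1).find?
        (bGood cp so (pyThr s)) = some (sh + (k : Int)) := by
      apply find?_range_first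
      · omega
      · exact bGood_of_rowGood cp so (pyThr s) (sh + (k : Int))
          (by rw [show so + (sh + (k : Int)) = so + sh + (k : Int) by ring]; exact hgood)
      · intro k' hk'
        apply bGood_of_rowBad
        rw [show so + (sh + (k' : Int)) = so + sh + (k' : Int) by ring]
        exact hbads k' hk'
    simp only [hA, hnil, hfind, PySem.List.pyGet?_neg_one, List.getLast?_nil, Option.getD_some]
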